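-- pv_equiv track=rewrite | github.com/ClemensWatzenboeck/cdata_utils | cdata_utils/descriptive/basic_stats.py | n_subscript_repr
-- ===== SOURCE A (Python) =====
-- def n_subscript_repr(max: int, min=1, n="n") -> str:
--     """
--     >>> n_subscript_repr(max=4, min=0, n="n")
--     '(n₀, n₁, n₂, n₃, n₄)'
--     >>> n_subscript_repr(max=2, n="n")
--     '(n₁, n₂)'
--     """
--
--     # Define a list to store the formatted strings
--     formatted_numbers = []
--
--     # Unicode subscript characters for numbers 0-9
--     subscript_digits = [
--         "₀", "₁", "₂", "₃", "₄", "₅", "₆", "₇", "₈", "₉"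
--     ]
--
--     def int_to_subscript(number):
--         prefix = ""
--         if number < 0:
--             prefix = "₋"
--             number *= -1
--         subscript_index = "".join(subscript_digits[int(digit)] for digit in str(number))
--         return prefix + subscript_index
--
--
--     for i in range(min, max + 1):
--         # Get the subscript representation for the index
--         subscript_index = int_to_subscript(i)
--
--         # Append the formatted string to the list
--         formatted_numbers.append(f"{n}{subscript_index}")
--
--     # Join the formatted strings with commas
--     result = ", ".join(formatted_numbers)
--
--     return "(" + result + ")"
-- ===== SOURCE B (Python) =====
-- def n_subscript_repr(max: int, min=1, n="n") -> str:
--     # Arithmetic digit extraction: subscript digits are computed directly with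
--     # chr(0x2080 + r) from divmod recursion -- no str(i), no digit table, no join;
--     # the result is accumulated in a single pass over the range.
--     def digits(m):
--         q, r = divmod(m, 10)
--         d = chr(0x2080 + r)
--         return d if q == 0 else digits(q) + d
--
--     out = "("
--     for i in range(min, max + 1):
--         out += n + ("\u208b" + digits(-i) if i < 0 else digits(i))
--         if i < max:
--             out += ", "
--     return out + ")"
-- ===== Notes on version B (the rewrite author's own statement) =====
-- stated objective: alternative
-- what changed: B never forms str(i) or a digit table: subscript digits come straight from arithmetic divmod recursion as chr(0x2080+r), built most-significant-first by recursion, and the result string is accumulated in one pass over the range with an explicit last-element comma test instead of list-append plus ', '.join.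
import Mathlib
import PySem

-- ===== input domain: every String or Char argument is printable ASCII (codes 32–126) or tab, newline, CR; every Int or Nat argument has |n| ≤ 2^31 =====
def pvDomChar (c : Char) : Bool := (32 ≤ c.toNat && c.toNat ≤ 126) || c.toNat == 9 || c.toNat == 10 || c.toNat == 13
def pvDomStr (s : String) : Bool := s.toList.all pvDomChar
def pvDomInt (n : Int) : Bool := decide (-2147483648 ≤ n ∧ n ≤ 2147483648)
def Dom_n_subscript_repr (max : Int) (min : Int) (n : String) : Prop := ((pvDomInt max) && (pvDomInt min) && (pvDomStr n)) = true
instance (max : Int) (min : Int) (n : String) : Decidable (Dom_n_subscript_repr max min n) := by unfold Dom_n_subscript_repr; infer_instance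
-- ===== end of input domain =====

-- B computes subscript digits directly by divmod recursion (chr(0x2080+r)), never forming
-- str(i) or a digit table, and accumulates the output in one pass instead of list + join
-- (objective: alternative decomposition, same cost).

-- ===== PORT A =====
def pvSubscriptDigits : List String :=
  ["₀", "₁", "₂", "₃", "₄", "₅", "₆", "₇", "₈", "₉"]

-- int(digit) on a one-char digit string never raises; '.getD 0' is unreachable there (exact on A's inputs)
def pvIntToSubscript (number : Int) : String :=
  let pr : String := if number < 0 then "₋" else ""
  let number : Int := if number < 0 then number * (-1) else number
  let subscriptIndex : String := PySem.Str.join ""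
    ((PySem.Int.toStr number).toList.map
      (fun digit => PySem.List.pyGetD pvSubscriptDigits ((PySem.Int.ofStr? (String.ofList [digit])).getD 0) ""))
  pr ++ subscriptIndex

def n_subscript_repr (max : Int) (min : Int) (n : String) : String :=
  let formattedNumbers : List String :=
    (PySem.List.pyRange min (max + 1) 1).foldl (fun acc i => acc ++ [n ++ pvIntToSubscript i]) []
  let result := PySem.Str.join ", " formattedNumbers
  "(" ++ result ++ ")"

-- ===== PORT B =====
-- digits(m): divmod recursion, most-significant digit first; called only on m ≥ 0 (exact there)
def pvDigitsB (m : Nat) : String :=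
  if h : m / 10 = 0 then String.ofList [Char.ofNat (0x2080 + m % 10)]
  else pvDigitsB (m / 10) ++ String.ofList [Char.ofNat (0x2080 + m % 10)]
termination_by m
decreasing_by
  have hm : m ≠ 0 := by rintro rfl; simp at h
  exact Nat.div_lt_self (Nat.pos_of_ne_zero hm) (by norm_num)

def n_subscript_repr_alt (max : Int) (min : Int) (n : String) : String :=
  let out : String :=
    (PySem.List.pyRange min (max + 1) 1).foldl
      (fun out i =>
        let out := out ++ (n ++ (if i < 0 then "₋" ++ pvDigitsB (-i).toNat else pvDigitsB i.toNat))
        if i < max then out ++ ", " else out)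
      "("
  out ++ ")"

-- ===== PRECONDITION & SPEC =====
def Spec_n_subscript_repr (max : Int) (min : Int) (n : String) (out : String) : Prop := out = n_subscript_repr_alt max min n
instance (max : Int) (min : Int) (n : String) (out : String) : Decidable (Spec_n_subscript_repr max min n out) := by unfold Spec_n_subscript_repr; infer_instance

-- ===== CLAIM (what is proved, stated in full; the proofs are below) =====
def Claim_equal_n_subscript_repr : Prop := ∀ (max : Int) (min : Int) (n : String), Dom_n_subscript_repr max min n → Spec_n_subscript_repr max min n (n_subscript_repr max min n)

-- ===== LEMMAS AND PROOFS =====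

-- the digit-char → subscript-char shift ('0' + 0x2050 = '₀')
def pvH (c : Char) : Char := Char.ofNat (c.toNat + 8272)

def pvDigitChars : List Char := ['0','1','2','3','4','5','6','7','8','9']

theorem pv_toDigitsCore_mem (fuel : ℕ) :
    ∀ (m : ℕ) (ds : List Char), (∀ c ∈ ds, c ∈ pvDigitChars) →
      ∀ c ∈ Nat.toDigitsCore 10 fuel m ds, c ∈ pvDigitChars := by
  induction fuel with
  | zero => intro m ds hds c hc; simpa [Nat.toDigitsCore] using hds c hc
  | succ f ih =>
    intro m ds hds c hc
    have hd : (m % 10).digitChar ∈ pvDigitChars := by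
      have h10 : m % 10 < 10 := Nat.mod_lt _ (by norm_num)
      interval_cases (m % 10) <;> decide
    have hcons : ∀ x ∈ (m % 10).digitChar :: ds, x ∈ pvDigitChars := by
      intro x hx
      rcases List.mem_cons.mp hx with h | h
      · exact h ▸ hd
      · exact hds x h
    simp only [Nat.toDigitsCore] at hc
    by_cases h0 : m / 10 = 0
    · rw [if_pos h0] at hc
      exact hcons c hc
    · rw [if_neg h0] at hc
      exact ih (m / 10) _ hcons c hc

theorem pv_toDigits_mem (m : ℕ) : ∀ c ∈ Nat.toDigits 10 m, c ∈ pvDigitChars :=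
  pv_toDigitsCore_mem (m + 1) m [] (by intro c hc; cases hc)

theorem pv_digit_lookup (c : Char) (hc : c ∈ pvDigitChars) :
    PySem.List.pyGetD pvSubscriptDigits ((PySem.Int.ofStr? (String.ofList [c])).getD 0) ""
      = String.ofList [pvH c] := by
  fin_cases hc <;> decide

theorem pv_digits_join (m : ℕ) :
    PySem.Chars.join []
      ((Nat.toDigits 10 m).map (fun c =>
        (PySem.List.pyGetD pvSubscriptDigits ((PySem.Int.ofStr? (String.ofList [c])).getD 0) "").toList))
      = (Nat.toDigits 10 m).map pvH := by
  have h : (Nat.toDigits 10 m).map (fun c =>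
        (PySem.List.pyGetD pvSubscriptDigits ((PySem.Int.ofStr? (String.ofList [c])).getD 0) "").toList)
      = (Nat.toDigits 10 m).map (fun c => [pvH c]) := by
    apply List.map_congr_left
    intro c hc
    rw [pv_digit_lookup c (pv_toDigits_mem m c hc)]
    simp [String.toList_ofList]
  rw [h, show ((Nat.toDigits 10 m).map (fun c => [pvH c]))
        = (((Nat.toDigits 10 m).map pvH).map (fun c => [c])) by simp,
    PySem.Chars.join_nil_singletons]

theorem pv_core (fuel : ℕ) :
    ∀ (m : ℕ) (ds : List Char), m < fuel →
      (Nat.toDigitsCore 10 fuel m ds).map pvH = (pvDigitsB m).toList ++ ds.map pvH := by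
  induction fuel with
  | zero => intro m ds h; omega
  | succ f ih =>
    intro m ds h
    have hdig : pvH ((m % 10).digitChar) = Char.ofNat (0x2080 + m % 10) := by
      have h10 : m % 10 < 10 := Nat.mod_lt _ (by norm_num)
      interval_cases (m % 10) <;> decide
    rw [pvDigitsB]
    simp only [Nat.toDigitsCore]
    by_cases h0 : m / 10 = 0
    · rw [if_pos h0, dif_pos h0]
      simp [hdig, String.toList_ofList]
    · rw [if_neg h0, dif_neg h0]
      have hm : 0 < m := by
        rcases Nat.eq_zero_or_pos m with rfl | hp
        · simp at h0
        · exact hp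
      have hlt : m / 10 < f := lt_of_lt_of_le (Nat.div_lt_self hm (by norm_num)) (by omega)
      rw [ih (m / 10) _ hlt]
      simp [hdig, String.toList_ofList, String.toList_append]

theorem pv_digitsB_eq (m : ℕ) :
    (Nat.toDigits 10 m).map pvH = (pvDigitsB m).toList := by
  have := pv_core (m + 1) m [] (by omega)
  simpa [Nat.toDigits] using this

theorem pv_sub_eq (i : Int) :
    pvIntToSubscript i
      = (if i < 0 then "₋" ++ pvDigitsB (-i).toNat else pvDigitsB i.toNat) := by
  apply String.toList_inj.mp
  by_cases hneg : i < 0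
  · have htc' : (PySem.Int.toStr (i * (-1))).toList = Nat.toDigits 10 i.natAbs := by
      have hmul : i * (-1) = -i := by ring
      rw [hmul]
      have h2 : (-i).toNat = i.natAbs := by omega
      simp [PySem.Int.toList_toStr, PySem.Int.toChars, h2]
      omega
    have h3 : (-i).toNat = i.natAbs := by omega
    simp only [pvIntToSubscript, if_pos hneg]
    simp only [String.toList_append, PySem.Str.toList_join, htc', List.map_map]
    rw [show ((fun s => String.toList s) ∘ fun digit =>
          PySem.List.pyGetD pvSubscriptDigits ((PySem.Int.ofStr? (String.ofList [digit])).getD 0) "")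
        = (fun c => (PySem.List.pyGetD pvSubscriptDigits ((PySem.Int.ofStr? (String.ofList [c])).getD 0) "").toList) from rfl]
    rw [show ("".toList : List Char) = [] from rfl, pv_digits_join, pv_digitsB_eq, h3]
  · have htc : (PySem.Int.toStr i).toList = Nat.toDigits 10 i.toNat := by
      simp [PySem.Int.toList_toStr, PySem.Int.toChars, hneg]
    simp only [pvIntToSubscript, if_neg hneg]
    simp only [String.toList_append, PySem.Str.toList_join, htc, List.map_map]
    rw [show ((fun s => String.toList s) ∘ fun digit =>
          PySem.List.pyGetD pvSubscriptDigits ((PySem.Int.ofStr? (String.ofList [digit])).getD 0) "")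
        = (fun c => (PySem.List.pyGetD pvSubscriptDigits ((PySem.Int.ofStr? (String.ofList [c])).getD 0) "").toList) from rfl]
    rw [show ("".toList : List Char) = [] from rfl, pv_digits_join, pv_digitsB_eq]
    rfl

theorem pv_loop (max2 : Int) (n : String) (k : ℕ) :
    ∀ (mn : Int) (acc : String), (max2 + 1 - mn).toNat = k →
      (PySem.List.pyRange mn (max2 + 1) 1).foldl
          (fun out i =>
            let out := out ++ (n ++ (if i < 0 then "₋" ++ pvDigitsB (-i).toNat else pvDigitsB i.toNat))
            if i < max2 then out ++ ", " else out)
          acc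
        = acc ++ PySem.Str.join ", "
            ((PySem.List.pyRange mn (max2 + 1) 1).map
              (fun i => n ++ (if i < 0 then "₋" ++ pvDigitsB (-i).toNat else pvDigitsB i.toNat))) := by
  induction k with
  | zero =>
    intro mn acc hk
    have hle : max2 + 1 ≤ mn := by omega
    rw [PySem.List.pyRange_one_eq_nil hle]
    apply String.toList_inj.mp
    simp [PySem.Str.toList_join, PySem.Chars.join, String.toList_append, List.intercalate]
  | succ k ih =>
    intro mn acc hk
    have hlt : mn < max2 + 1 := by omega
    rw [PySem.List.pyRange_one_cons hlt]
    simp only [List.foldl_cons, List.map_cons]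
    by_cases hmx : mn < max2
    · rw [if_pos hmx]
      rw [ih (mn + 1) _ (by omega)]
      rw [PySem.List.pyRange_one_cons (by omega : mn + 1 < max2 + 1)]
      apply String.toList_inj.mp
      simp only [List.map_cons, String.toList_append, PySem.Str.toList_join,
        PySem.Chars.join_cons_cons, List.append_assoc]
    · have heq : mn = max2 := by omega
      subst heq
      rw [if_neg (lt_irrefl _)]
      rw [PySem.List.pyRange_one_eq_nil (le_refl _)]
      apply String.toList_inj.mp
      simp [PySem.Str.toList_join, PySem.Chars.join, String.toList_append, List.intercalate]

-- ===== VERDICT (by name: the statement is the Claim_ definition above) =====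
theorem n_subscript_repr_spec : Claim_equal_n_subscript_repr := by
  intro max min n _
  unfold Spec_n_subscript_repr n_subscript_repr n_subscript_repr_alt
  rw [PySem.List.foldl_append_singleton_eq_map]
  simp only [List.nil_append]
  rw [pv_loop max n ((max + 1 - min).toNat) min "(" rfl]
  have hmap : (fun i => n ++ pvIntToSubscript i)
      = (fun i => n ++ (if i < 0 then "₋" ++ pvDigitsB (-i).toNat else pvDigitsB i.toNat)) :=
    funext fun i => by rw [pv_sub_eq]
  rw [hmap]
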